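-- pv_equiv track=rewrite | github.com/AhangGameStudio/KaLI-App | core/wireless/scanner.py | _parse_linux_scan
-- ===== SOURCE A (Python) =====
-- def _parse_linux_scan(output):
--     """解析Linux系统的扫描输出"""
--     results = []
--     current_network = {}
--
--     lines = output.split('\n')
--     for line in lines:
--         line = line.strip()
--
--         if 'ESSID' in line:
--             if current_network:
--                 results.append(current_network)
--                 current_network = {}
--             current_network['ssid'] = line.split(':', 1)[1].strip('"')
--         elif 'Address' in line:
--             current_network['bssid'] = line.split(':', 1)[1].strip()
--         elif 'Quality' in line:
--             current_network['signal'] = line.split('=')[1].split(' ')[0]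
--         elif 'Channel' in line:
--             current_network['channel'] = line.split(':', 1)[1].strip()
--         elif 'Encryption key' in line:
--             current_network['encryption'] = 'WEP' if 'on' in line else 'Open'
--         elif 'IE: IEEE 802.11i/WPA2 Version 1' in line:
--             current_network['encryption'] = 'WPA2'
--         elif 'IE: IEEE 802.11i/WPA Version 1' in line:
--             current_network['encryption'] = 'WPA'
--
--     if current_network:
--         results.append(current_network)
--
--     return results
-- ===== SOURCE B (Python) =====
-- # B: two-pass decomposition — first segment the output into record blocks at ESSID lines,
-- # then parse each block independently into a dict; A interleaves both in one state machine.
-- def _parse_linux_scan(output):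
--     lines = output.split('\n')
--
--     # pass 1: segmentation — a new block starts AT each line whose stripped form contains ESSID
--     blocks = []
--     current = []
--     for raw in lines:
--         if 'ESSID' in raw.strip():
--             blocks.append(current)
--             current = [raw]
--         else:
--             current.append(raw)
--     blocks.append(current)
--
--     # pass 2: parse each block into a network dict; drop empty dicts
--     results = []
--     for block in blocks:
--         net = {}
--         for line in block:
--             line = line.strip()
--             if 'ESSID' in line:
--                 net['ssid'] = line.split(':', 1)[1].strip('"')
--             elif 'Address' in line:
--                 net['bssid'] = line.split(':', 1)[1].strip()
--             elif 'Quality' in line: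
--                 net['signal'] = line.split('=')[1].split(' ')[0]
--             elif 'Channel' in line:
--                 net['channel'] = line.split(':', 1)[1].strip()
--             elif 'Encryption key' in line:
--                 net['encryption'] = 'WEP' if 'on' in line else 'Open'
--             elif 'IE: IEEE 802.11i/WPA2 Version 1' in line:
--                 net['encryption'] = 'WPA2'
--             elif 'IE: IEEE 802.11i/WPA Version 1' in line:
--                 net['encryption'] = 'WPA'
--         if net:
--             results.append(net)
--     return results
-- ===== Notes on version B (the rewrite author's own statement) =====
-- stated objective: alternative
-- what changed: Replaces A's single interleaved state machine (one dict threaded through the whole line loop with flush-on-ESSID) by a two-pass segment-then-parse decomposition: first split the lines into record blocks at ESSID boundaries, then parse each block independently and keep the non-empty dicts.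
import Mathlib
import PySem

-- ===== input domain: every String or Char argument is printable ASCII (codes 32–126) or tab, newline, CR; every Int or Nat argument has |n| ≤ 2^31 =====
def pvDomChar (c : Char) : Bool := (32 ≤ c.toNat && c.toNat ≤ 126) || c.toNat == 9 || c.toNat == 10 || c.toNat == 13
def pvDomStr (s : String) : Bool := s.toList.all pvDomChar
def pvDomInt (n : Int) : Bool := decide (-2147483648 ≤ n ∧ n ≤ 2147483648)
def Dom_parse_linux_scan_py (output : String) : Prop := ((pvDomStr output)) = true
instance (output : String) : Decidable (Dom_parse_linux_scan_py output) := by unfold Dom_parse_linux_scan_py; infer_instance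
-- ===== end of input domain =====

-- B replaces A's one interleaved state machine by a two-pass segment-then-parse decomposition
-- (same O(n) cost, no speed claim); A and B agree on every input on which A returns.

-- ===== PORT A =====
-- line.split(':', 1)[1]  (the [1] raises IndexError when the colon is absent: excluded by Pre_; .getD "" is never reached inside Pre_)
def pvAfterColon (line : String) : String :=
  (PySem.List.pyGet? ((PySem.Str.splitMax? line ":" 1).getD []) 1).getD ""

-- line.split('=')[1].split(' ')[0]  (the [1] raises IndexError when the equals sign is absent: excluded by Pre_)
def pvSignal (line : String) : String :=
  let p := (PySem.List.pyGet? ((PySem.Str.split? line "=").getD []) 1).getD ""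
  (PySem.List.pyGet? ((PySem.Str.split? p " ").getD []) 0).getD ""

-- the body of A's for-loop: state = (results, current_network)
def pvStepA (acc : List (PySem.Dict String String) × PySem.Dict String String) (raw : String) :
    List (PySem.Dict String String) × PySem.Dict String String :=
  let line := PySem.Str.strip raw
  if PySem.Str.isIn "ESSID" line then
    let (results, cur) := if acc.2.items = [] then acc else (acc.1 ++ [acc.2], PySem.Dict.empty)
    (results, cur.insert "ssid" (PySem.Str.stripChars (pvAfterColon line) "\""))
  else if PySem.Str.isIn "Address" line then
    (acc.1, acc.2.insert "bssid" (PySem.Str.strip (pvAfterColon line)))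
  else if PySem.Str.isIn "Quality" line then
    (acc.1, acc.2.insert "signal" (pvSignal line))
  else if PySem.Str.isIn "Channel" line then
    (acc.1, acc.2.insert "channel" (PySem.Str.strip (pvAfterColon line)))
  else if PySem.Str.isIn "Encryption key" line then
    (acc.1, acc.2.insert "encryption" (if PySem.Str.isIn "on" line then "WEP" else "Open"))
  else if PySem.Str.isIn "IE: IEEE 802.11i/WPA2 Version 1" line then
    (acc.1, acc.2.insert "encryption" "WPA2")
  else if PySem.Str.isIn "IE: IEEE 802.11i/WPA Version 1" line then
    (acc.1, acc.2.insert "encryption" "WPA")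
  else acc

def parse_linux_scan_py (output : String) : List (List (String × String)) :=
  let lines := (PySem.Str.split? output "\n").getD []
  let st := lines.foldl pvStepA ([], PySem.Dict.empty)
  let results := if st.2.items = [] then st.1 else st.1 ++ [st.2]
  results.map (·.items)

-- ===== PORT B =====
-- body of B's inner per-block loop: the same elif chain, no flushing
def pvLineUpd (net : PySem.Dict String String) (raw : String) : PySem.Dict String String :=
  let line := PySem.Str.strip raw
  if PySem.Str.isIn "ESSID" line then
    net.insert "ssid" (PySem.Str.stripChars (pvAfterColon line) "\"")
  else if PySem.Str.isIn "Address" line then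
    net.insert "bssid" (PySem.Str.strip (pvAfterColon line))
  else if PySem.Str.isIn "Quality" line then
    net.insert "signal" (pvSignal line)
  else if PySem.Str.isIn "Channel" line then
    net.insert "channel" (PySem.Str.strip (pvAfterColon line))
  else if PySem.Str.isIn "Encryption key" line then
    net.insert "encryption" (if PySem.Str.isIn "on" line then "WEP" else "Open")
  else if PySem.Str.isIn "IE: IEEE 802.11i/WPA2 Version 1" line then
    net.insert "encryption" "WPA2"
  else if PySem.Str.isIn "IE: IEEE 802.11i/WPA Version 1" line then
    net.insert "encryption" "WPA"
  else net

-- pass 1 body: start a new block at each line whose stripped form contains ESSID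
def pvSegStep (acc : List (List String) × List String) (raw : String) :
    List (List String) × List String :=
  if PySem.Str.isIn "ESSID" (PySem.Str.strip raw) then (acc.1 ++ [acc.2], [raw])
  else (acc.1, acc.2 ++ [raw])

def parse_linux_scan_py_alt (output : String) : List (List (String × String)) :=
  let lines := (PySem.Str.split? output "\n").getD []
  let seg := lines.foldl pvSegStep ([], [])
  let blocks := seg.1 ++ [seg.2]
  blocks.foldl (fun res block =>
    let net := block.foldl pvLineUpd PySem.Dict.empty
    if net.items = [] then res else res ++ [net.items]) []

-- ===== PRECONDITION & SPEC =====
-- one line is safe: the branch A takes on it does not index past the end of a split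
def pvLineOK (raw : String) : Bool :=
  let line := PySem.Str.strip raw
  if PySem.Str.isIn "ESSID" line then PySem.Str.isIn ":" line
  else if PySem.Str.isIn "Address" line then PySem.Str.isIn ":" line
  else if PySem.Str.isIn "Quality" line then PySem.Str.isIn "=" line
  else if PySem.Str.isIn "Channel" line then PySem.Str.isIn ":" line
  else true

-- Pre_ excludes exactly the inputs on which A raises IndexError: a line whose taken branch
-- indexes element 1 of a colon split (ESSID/Address/Channel) or of an equals-sign split
-- (Quality) although the line lacks that separator, so the split has a single piece.
def Pre_parse_linux_scan_py (output : String) : Prop :=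
  ((PySem.Str.split? output "\n").getD []).all pvLineOK = true
instance (output : String) : Decidable (Pre_parse_linux_scan_py output) := by
  unfold Pre_parse_linux_scan_py; infer_instance

def pvWitness_parse_linux_scan_py : String :=
  "ESSID:\"ap\"\nChannel:6"

def Spec_parse_linux_scan_py (output : String) (out : List (List (String × String))) : Prop := out = parse_linux_scan_py_alt output
instance (output : String) (out : List (List (String × String))) : Decidable (Spec_parse_linux_scan_py output out) := by unfold Spec_parse_linux_scan_py; infer_instance

-- ===== CLAIM (what is proved, stated in full; the proofs are below) =====
def Claim_equal_parse_linux_scan_py : Prop := ∀ (output : String), Dom_parse_linux_scan_py output → Pre_parse_linux_scan_py output → Spec_parse_linux_scan_py output (parse_linux_scan_py output)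

-- ===== LEMMAS AND PROOFS =====

-- proof-side abbreviations
def pvNetOf (b : List String) : PySem.Dict String String := b.foldl pvLineUpd PySem.Dict.empty

def pvFlush (rs : List (PySem.Dict String String)) (c : PySem.Dict String String) :
    List (PySem.Dict String String) := if c.items = [] then rs else rs ++ [c]

def pvEmit (acc : List (List (String × String))) (bs : List (List String)) : List (List (String × String)) :=
  bs.foldl (fun res block =>
    let net := block.foldl pvLineUpd PySem.Dict.empty
    if net.items = [] then res else res ++ [net.items]) acc

-- A's loop body = flush-on-ESSID + B's per-line update
lemma pvStepA_eq (acc : List (PySem.Dict String String) × PySem.Dict String String) (raw : String) :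
    pvStepA acc raw =
      if PySem.Str.isIn "ESSID" (PySem.Str.strip raw) then
        (pvFlush acc.1 acc.2, pvLineUpd PySem.Dict.empty raw)
      else (acc.1, pvLineUpd acc.2 raw) := by
  obtain ⟨rs, cur⟩ := acc
  unfold pvStepA pvLineUpd pvFlush
  by_cases h : PySem.Str.isIn "ESSID" (PySem.Str.strip raw) = true
  · rw [if_pos h, if_pos h, if_pos h]
    by_cases h2 : cur.items = []
    · have he : cur = PySem.Dict.empty := PySem.Dict.ext (by simp [h2, PySem.Dict.empty])
      rw [if_pos h2, if_pos h2, he]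
    · rw [if_neg h2, if_neg h2]
  · rw [if_neg h, if_neg h, if_neg h]
    split_ifs <;> rfl

lemma pvSegStep_pos {raw : String} (acc : List (List String) × List String)
    (h : PySem.Str.isIn "ESSID" (PySem.Str.strip raw) = true) :
    pvSegStep acc raw = (acc.1 ++ [acc.2], [raw]) := by
  unfold pvSegStep; rw [if_pos h]

lemma pvSegStep_neg {raw : String} (acc : List (List String) × List String)
    (h : ¬ PySem.Str.isIn "ESSID" (PySem.Str.strip raw) = true) :
    pvSegStep acc raw = (acc.1, acc.2 ++ [raw]) := by
  unfold pvSegStep; rw [if_neg h]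

-- segmentation with an accumulated block list = accumulator-free segmentation, prefixed
lemma pvSeg_prefix (lines : List String) (bs : List (List String)) (c : List String) :
    lines.foldl pvSegStep (bs, c) =
      (bs ++ (lines.foldl pvSegStep ([], c)).1, (lines.foldl pvSegStep ([], c)).2) := by
  induction lines generalizing bs c with
  | nil => simp
  | cons raw rest ih =>
    simp only [List.foldl_cons]
    by_cases h : PySem.Str.isIn "ESSID" (PySem.Str.strip raw) = true
    · rw [pvSegStep_pos _ h, pvSegStep_pos _ h]
      rw [ih (bs ++ [c]) [raw], ih ([] ++ [c]) [raw]]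
      simp
    · rw [pvSegStep_neg _ h, pvSegStep_neg _ h]
      exact ih bs (c ++ [raw])

-- B's emission loop is a filter-then-map
lemma pvEmit_eq (acc : List (List (String × String))) (bs : List (List String)) :
    pvEmit acc bs =
      acc ++ (bs.filter (fun b => !(pvNetOf b).items.isEmpty)).map (fun b => (pvNetOf b).items) := by
  unfold pvEmit
  have h1 : (bs.foldl (fun res block =>
        let net := block.foldl pvLineUpd PySem.Dict.empty
        if net.items = [] then res else res ++ [net.items]) acc)
      = bs.foldl (fun res block =>
          if (!(pvNetOf block).items.isEmpty) = true then res ++ [(pvNetOf block).items] else res) acc := by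
    apply PySem.List.foldl_congr_mem
    intro a x _
    simp only [pvNetOf]
    cases hx : (x.foldl pvLineUpd PySem.Dict.empty).items <;> simp_all
  rw [h1, PySem.List.foldl_append_if]

-- the main invariant: running A's state machine from state (rs, parse of pre) equals
-- segmenting the remaining lines (current block pre) and parsing block-wise
lemma pvMain (lines : List String) (rs : List (PySem.Dict String String)) (pre : List String) :
    (pvFlush (lines.foldl pvStepA (rs, pvNetOf pre)).1
             (lines.foldl pvStepA (rs, pvNetOf pre)).2).map (·.items)
      = rs.map (·.items) ++
        pvEmit [] ((lines.foldl pvSegStep ([], pre)).1 ++ [(lines.foldl pvSegStep ([], pre)).2]) := by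
  induction lines generalizing rs pre with
  | nil =>
    by_cases hp : (pvNetOf pre).items = [] <;>
      simp [pvFlush, pvEmit_eq, hp]
  | cons raw rest ih =>
    simp only [List.foldl_cons]
    by_cases h : PySem.Str.isIn "ESSID" (PySem.Str.strip raw) = true
    · rw [pvStepA_eq, if_pos h, pvSegStep_pos _ h]
      have hl : pvLineUpd PySem.Dict.empty raw = pvNetOf [raw] := by
        simp [pvNetOf]
      rw [hl, ih (pvFlush rs (pvNetOf pre)) [raw]]
      rw [show (([], pre) : List (List String) × List String).1 ++ [([], pre).2] = [pre] from rfl]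
      rw [pvSeg_prefix rest [pre] [raw]]
      by_cases hp : (pvNetOf pre).items = [] <;>
        simp [pvFlush, pvEmit_eq, hp, List.append_assoc]
    · rw [pvStepA_eq, if_neg h, pvSegStep_neg _ h]
      have hl : pvLineUpd (pvNetOf pre) raw = pvNetOf (pre ++ [raw]) := by
        simp [pvNetOf]
      rw [hl]
      exact ih rs (pre ++ [raw])

-- ===== VERDICT (by name: the statement is the Claim_ definition above) =====
theorem parse_linux_scan_py_spec : Claim_equal_parse_linux_scan_py := by
  intro output _ _
  unfold Spec_parse_linux_scan_py parse_linux_scan_py parse_linux_scan_py_alt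
  have h := pvMain ((PySem.Str.split? output "\n").getD []) [] []
  simpa [pvNetOf, pvFlush, pvEmit] using h
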